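-- pv_equiv track=rewrite | github.com/setl1n/Advent-of-Code-2023 | day11p1.py | expand_blanks
-- ===== SOURCE A (Python) =====
-- def expand_blanks(input_data):
--     num_of_cols = len(input_data[0])
--     num_of_rows = len(input_data)
--     blank_cols = [True] * num_of_cols
--     blank_rows = [True] * num_of_rows
--     for i,row in enumerate(input_data):
--         for j,col in enumerate(row):
--             if col == "#":
--                 blank_cols[j] = False
--                 blank_rows[i] = False
--     expanded_map = ['']* num_of_rows
--     for i,row in enumerate(input_data):
--         for j,col in enumerate(row):
--             if col == '#':
--                 expanded_map[i] += '#'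
--             elif blank_cols[j]:
--                 expanded_map[i] += '..'
--             else:
--                 expanded_map[i] += '.'
--     buffer = 0
--     for i,blank_row in enumerate(blank_rows):
--         if blank_row:
--             expanded_map.insert(buffer + i,'.' * len(expanded_map[0]))
--             buffer += 1
--     return expanded_map
-- ===== SOURCE B (Python) =====
-- def expand_blanks(input_data):
--     blank_cols = [True] * len(input_data[0])
--     for row in input_data:
--         for j, c in enumerate(row):
--             if c == '#':
--                 blank_cols[j] = False
--     out = []
--     width = -1
--     for row in input_data:
--         expanded = ''.join('#' if c == '#' else '..' if blank_cols[j] else '.' for j, c in enumerate(row))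
--         if width < 0:
--             width = len(expanded)
--         if '#' not in row:
--             out.append('.' * width)
--         out.append(expanded)
--     return out
-- ===== Notes on version B (the rewrite author's own statement) =====
-- stated objective: simpler
-- what changed: B keeps A's blank-column scan but replaces A's three remaining passes (the blank_rows array, the per-index string accumulation into a preallocated list, and the insert-with-buffer pass) with one pass that builds each expanded row via a join and emits the duplicated blank line (of the first expanded row's width) in place, so the buffer/insert bookkeeping disappears.
import Mathlib
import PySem

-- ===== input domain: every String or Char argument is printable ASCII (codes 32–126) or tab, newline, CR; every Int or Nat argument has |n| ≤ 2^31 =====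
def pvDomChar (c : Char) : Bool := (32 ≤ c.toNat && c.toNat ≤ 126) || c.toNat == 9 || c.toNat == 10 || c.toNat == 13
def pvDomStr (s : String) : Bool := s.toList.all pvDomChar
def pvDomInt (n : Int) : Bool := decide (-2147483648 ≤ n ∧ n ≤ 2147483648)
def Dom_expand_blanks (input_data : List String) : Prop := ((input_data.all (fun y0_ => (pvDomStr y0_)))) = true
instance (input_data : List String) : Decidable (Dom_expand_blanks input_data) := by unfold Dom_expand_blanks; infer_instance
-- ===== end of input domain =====

-- B folds A's blank-row/insert bookkeeping into the single row-building pass: same values, simpler decomposition.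

-- ===== PORT A =====
def expand_blanks (input_data : List String) : List String :=
  let rows := input_data.map String.toList
  let num_of_cols := (PySem.List.pyGetD rows 0 []).length
  let num_of_rows := rows.length
  -- first pass: blank_cols / blank_rows, one fold over enumerate(input_data) with the pair as state
  let st1 := (PySem.List.enumerate rows 0).foldl
    (fun (st : List Bool × List Bool) p =>
      (PySem.List.enumerate p.2 0).foldl
        (fun (st : List Bool × List Bool) q =>
          if q.2 = '#' then (PySem.List.pySetD st.1 q.1 false, PySem.List.pySetD st.2 p.1 false) else st)
        st)
    (List.replicate num_of_cols true, List.replicate num_of_rows true)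
  let blank_cols := st1.1
  let blank_rows := st1.2
  -- second pass: expanded_map[i] += piece
  let expanded_map := (PySem.List.enumerate rows 0).foldl
    (fun (em : List (List Char)) p =>
      (PySem.List.enumerate p.2 0).foldl
        (fun (em : List (List Char)) q =>
          if q.2 = '#' then PySem.List.pySetD em p.1 (PySem.List.pyGetD em p.1 [] ++ ['#'])
          else if PySem.List.pyGetD blank_cols q.1 false then
            PySem.List.pySetD em p.1 (PySem.List.pyGetD em p.1 [] ++ ['.', '.'])
          else PySem.List.pySetD em p.1 (PySem.List.pyGetD em p.1 [] ++ ['.']))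
        em)
    (List.replicate num_of_rows ([] : List Char))
  -- third pass: insert '.' * len(expanded_map[0]) at buffer + i for each blank row
  let fin := (PySem.List.enumerate blank_rows 0).foldl
    (fun (st : List (List Char) × Int) p =>
      if p.2 then
        (PySem.List.insert st.1 (st.2 + p.1)
          (List.replicate (PySem.List.pyGetD st.1 0 []).length '.'), st.2 + 1)
      else st)
    (expanded_map, 0)
  fin.1.map (fun cs => String.ofList cs)

-- ===== PORT B =====
def expand_blanks_alt (input_data : List String) : List String :=
  let rows := input_data.map String.toList
  let blank_cols := rows.foldl
    (fun (bc : List Bool) row =>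
      (PySem.List.enumerate row 0).foldl
        (fun (bc : List Bool) q => if q.2 = '#' then PySem.List.pySetD bc q.1 false else bc) bc)
    (List.replicate (PySem.List.pyGetD rows 0 []).length true)
  let fin := rows.foldl
    (fun (st : List (List Char) × Int) row =>
      let expanded := (PySem.List.enumerate row 0).flatMap
        (fun q => if q.2 = '#' then ['#']
                  else if PySem.List.pyGetD blank_cols q.1 false then ['.', '.'] else ['.'])
      let width := if st.2 < 0 then (expanded.length : Int) else st.2
      let out := if PySem.Chars.isIn ['#'] row = false then st.1 ++ [List.replicate width.toNat '.'] else st.1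
      (out ++ [expanded], width))
    ([], -1)
  fin.1.map (fun cs => String.ofList cs)

-- ===== PRECONDITION & SPEC =====
-- Pre_ excludes exactly the inputs on which the Python A raises IndexError: the empty list
-- (input_data[0]) and inputs with a row longer than the first row (blank_cols[j] out of range).
-- B raises there as well, so nothing A returns on is excluded.
def Pre_expand_blanks (input_data : List String) : Prop :=
  input_data ≠ [] ∧ ∀ s ∈ input_data, s.toList.length ≤ (input_data.headD "").toList.length
instance (input_data : List String) : Decidable (Pre_expand_blanks input_data) := by
  unfold Pre_expand_blanks; infer_instance
def pvWitness_expand_blanks : List String := ["#.", ".."]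

def Spec_expand_blanks (input_data : List String) (out : List String) : Prop := out = expand_blanks_alt input_data
instance (input_data : List String) (out : List String) : Decidable (Spec_expand_blanks input_data out) := by unfold Spec_expand_blanks; infer_instance

-- ===== CLAIM (what is proved, stated in full; the proofs are below) =====
def Claim_equal_expand_blanks : Prop := ∀ (input_data : List String), Dom_expand_blanks input_data → Pre_expand_blanks input_data → Spec_expand_blanks input_data (expand_blanks input_data)

-- ===== LEMMAS AND PROOFS =====

theorem pv_pass1_prod (rows : List (List Char)) (s : Int) (bc br : List Bool) :
    (PySem.List.enumerate rows s).foldl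
      (fun (st : List Bool × List Bool) p =>
        (PySem.List.enumerate p.2 0).foldl
          (fun (st : List Bool × List Bool) q =>
            if q.2 = '#' then (PySem.List.pySetD st.1 q.1 false, PySem.List.pySetD st.2 p.1 false) else st)
          st)
      (bc, br)
    = ((PySem.List.enumerate rows s).foldl
        (fun (bc : List Bool) p =>
          (PySem.List.enumerate p.2 0).foldl
            (fun (bc : List Bool) q => if q.2 = '#' then PySem.List.pySetD bc q.1 false else bc) bc)
        bc,
       (PySem.List.enumerate rows s).foldl
        (fun (br : List Bool) p =>
          (PySem.List.enumerate p.2 0).foldl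
            (fun (br : List Bool) q => if q.2 = '#' then PySem.List.pySetD br p.1 false else br) br)
        br) := by
  have hout : (fun (st : List Bool × List Bool) (p : Int × List Char) =>
      (PySem.List.enumerate p.2 0).foldl
        (fun (st : List Bool × List Bool) q =>
          if q.2 = '#' then (PySem.List.pySetD st.1 q.1 false, PySem.List.pySetD st.2 p.1 false) else st)
        st)
    = (fun (st : List Bool × List Bool) p =>
        ((PySem.List.enumerate p.2 0).foldl
          (fun (bc : List Bool) q => if q.2 = '#' then PySem.List.pySetD bc q.1 false else bc) st.1,
         (PySem.List.enumerate p.2 0).foldl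
          (fun (br : List Bool) q => if q.2 = '#' then PySem.List.pySetD br p.1 false else br) st.2)) := by
    funext st p
    have hin : (fun (st : List Bool × List Bool) (q : Int × Char) =>
        if q.2 = '#' then (PySem.List.pySetD st.1 q.1 false, PySem.List.pySetD st.2 p.1 false) else st)
      = (fun st q => (if q.2 = '#' then PySem.List.pySetD st.1 q.1 false else st.1,
                      if q.2 = '#' then PySem.List.pySetD st.2 p.1 false else st.2)) := by
      funext st q; by_cases h : q.2 = '#' <;> simp [h]
    rw [hin]
    rw [show st = (st.1, st.2) from rfl]
    exact PySem.List.foldl_prod_mk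
      (fun (bc : List Bool) (q : Int × Char) => if q.2 = '#' then PySem.List.pySetD bc q.1 false else bc)
      (fun (br : List Bool) (q : Int × Char) => if q.2 = '#' then PySem.List.pySetD br p.1 false else br) _ _ _
  rw [hout]
  exact PySem.List.foldl_prod_mk
    (fun (bc : List Bool) (p : Int × List Char) =>
      (PySem.List.enumerate p.2 0).foldl
        (fun (bc : List Bool) q => if q.2 = '#' then PySem.List.pySetD bc q.1 false else bc) bc)
    (fun (br : List Bool) (p : Int × List Char) =>
      (PySem.List.enumerate p.2 0).foldl
        (fun (br : List Bool) q => if q.2 = '#' then PySem.List.pySetD br p.1 false else br) br) _ _ _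

theorem pv_bc_enum_drop (rows : List (List Char)) (s : Int) (bc : List Bool) :
    (PySem.List.enumerate rows s).foldl
      (fun (bc : List Bool) p =>
        (PySem.List.enumerate p.2 0).foldl
          (fun (bc : List Bool) q => if q.2 = '#' then PySem.List.pySetD bc q.1 false else bc) bc)
      bc
    = rows.foldl
      (fun (bc : List Bool) row =>
        (PySem.List.enumerate row 0).foldl
          (fun (bc : List Bool) q => if q.2 = '#' then PySem.List.pySetD bc q.1 false else bc) bc)
      bc := by
  induction rows generalizing s bc with
  | nil => simp [PySem.List.enumerate_nil]
  | cons r rs ih => simp only [PySem.List.enumerate_cons, List.foldl_cons]; exact ih _ _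

theorem pv_inner_br (l : List (Int × Char)) (i : Nat) (br : List Bool) :
    l.foldl (fun (br : List Bool) q => if q.2 = '#' then PySem.List.pySetD br (i : Int) false else br) br
    = if '#' ∈ l.map (·.2) then br.set i false else br := by
  induction l generalizing br with
  | nil => simp
  | cons q qs ih =>
    simp only [List.foldl_cons]
    by_cases h : q.2 = '#'
    · rw [if_pos h, ih]
      have hm : '#' ∈ List.map (fun x => x.2) (q :: qs) := by simp [h]
      rw [if_pos hm]
      split_ifs <;> simp [PySem.List.pySetD_natCast, List.set_set]
    · rw [if_neg h, ih]
      have h' : ¬ ('#' = q.2) := fun e => h e.symm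
      by_cases h2 : '#' ∈ List.map (fun x => x.2) qs
      · rw [if_pos h2, if_pos (by simp [List.mem_cons, h2])]
      · rw [if_neg h2, if_neg (by simp [List.mem_cons, h', h2])]

theorem pv_pass_br (rows : List (List Char)) (pre : List Bool) :
    (PySem.List.enumerate rows (pre.length : Int)).foldl
      (fun (br : List Bool) p =>
        (PySem.List.enumerate p.2 0).foldl
          (fun (br : List Bool) q => if q.2 = '#' then PySem.List.pySetD br p.1 false else br) br)
      (pre ++ List.replicate rows.length true)
    = pre ++ rows.map (fun r => if '#' ∈ r then false else true) := by
  induction rows generalizing pre with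
  | nil => simp
  | cons r rs ih =>
    simp only [PySem.List.enumerate_cons, List.foldl_cons, List.length_cons,
      List.replicate_succ]
    rw [pv_inner_br]
    have hmap : (PySem.List.enumerate r 0).map (·.2) = r := PySem.List.map_snd_enumerate r 0
    rw [hmap]
    have hset : ∀ (b : Bool), (pre ++ b :: List.replicate rs.length true).set pre.length false
        = pre ++ false :: List.replicate rs.length true := by
      intro b
      rw [List.set_append_right _ _ (le_refl _)]
      simp
    by_cases h : '#' ∈ r
    · rw [if_pos h, hset]
      have := ih (pre ++ [false])
      simpa [List.append_assoc, h] using this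
    · rw [if_neg h]
      have := ih (pre ++ [true])
      simpa [List.append_assoc, h] using this


theorem pv_inner_em {α : Type} (f : α → List Char) (l : List α) (i : Nat) (em : List (List Char)) :
    l.foldl (fun (em : List (List Char)) x => em.set i (em.getD i [] ++ f x)) em
    = em.set i (em.getD i [] ++ l.flatMap f) := by
  induction l generalizing em with
  | nil =>
    simp only [List.foldl_nil, List.flatMap_nil, List.append_nil]
    by_cases hi : i < em.length
    · rw [List.getD_eq_getElem em [] hi]; exact (List.set_getElem_self ..).symm
    · rw [List.set_eq_of_length_le (Nat.le_of_not_lt hi)]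
  | cons x xs ih =>
    simp only [List.foldl_cons, List.flatMap_cons]
    rw [ih]
    by_cases hi : i < em.length
    · have h2 : (em.set i (em.getD i [] ++ f x)).getD i [] = em.getD i [] ++ f x := by
        rw [List.getD_eq_getElem _ [] (by simpa using hi)]; simp
      rw [h2, List.set_set, List.append_assoc]
    · have hle : em.length ≤ i := Nat.le_of_not_lt hi
      rw [List.set_eq_of_length_le hle, List.set_eq_of_length_le hle, List.set_eq_of_length_le hle]

theorem pv_pass2 (bc : List Bool) (rows : List (List Char)) (pre : List (List Char)) :
    (PySem.List.enumerate rows (pre.length : Int)).foldl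
      (fun (em : List (List Char)) p =>
        (PySem.List.enumerate p.2 0).foldl
          (fun (em : List (List Char)) q =>
            if q.2 = '#' then PySem.List.pySetD em p.1 (PySem.List.pyGetD em p.1 [] ++ ['#'])
            else if PySem.List.pyGetD bc q.1 false then
              PySem.List.pySetD em p.1 (PySem.List.pyGetD em p.1 [] ++ ['.', '.'])
            else PySem.List.pySetD em p.1 (PySem.List.pyGetD em p.1 [] ++ ['.']))
          em)
      (pre ++ List.replicate rows.length ([] : List Char))
    = pre ++ rows.map (fun row => (PySem.List.enumerate row 0).flatMap
        (fun q => if q.2 = '#' then ['#']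
                  else if PySem.List.pyGetD bc q.1 false then ['.', '.'] else ['.'])) := by
  induction rows generalizing pre with
  | nil => simp
  | cons r rs ih =>
    simp only [PySem.List.enumerate_cons, List.foldl_cons, List.length_cons, List.replicate_succ]
    -- the first step: the inner fold at index pre.length
    have hstep : (PySem.List.enumerate r 0).foldl
        (fun (em : List (List Char)) q =>
          if q.2 = '#' then PySem.List.pySetD em ((pre.length : Int)) (PySem.List.pyGetD em ((pre.length : Int)) [] ++ ['#'])
          else if PySem.List.pyGetD bc q.1 false then
            PySem.List.pySetD em ((pre.length : Int)) (PySem.List.pyGetD em ((pre.length : Int)) [] ++ ['.', '.'])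
          else PySem.List.pySetD em ((pre.length : Int)) (PySem.List.pyGetD em ((pre.length : Int)) [] ++ ['.']))
        (pre ++ [] :: List.replicate rs.length ([] : List Char))
      = pre ++ ((PySem.List.enumerate r 0).flatMap
          (fun q => if q.2 = '#' then ['#']
                    else if PySem.List.pyGetD bc q.1 false then ['.', '.'] else ['.'])) :: List.replicate rs.length ([] : List Char) := by
      have hfun : (fun (em : List (List Char)) (q : Int × Char) =>
          if q.2 = '#' then PySem.List.pySetD em ((pre.length : Int)) (PySem.List.pyGetD em ((pre.length : Int)) [] ++ ['#'])
          else if PySem.List.pyGetD bc q.1 false then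
            PySem.List.pySetD em ((pre.length : Int)) (PySem.List.pyGetD em ((pre.length : Int)) [] ++ ['.', '.'])
          else PySem.List.pySetD em ((pre.length : Int)) (PySem.List.pyGetD em ((pre.length : Int)) [] ++ ['.']))
        = (fun (em : List (List Char)) (q : Int × Char) =>
            em.set pre.length (em.getD pre.length [] ++
              (if q.2 = '#' then ['#'] else if PySem.List.pyGetD bc q.1 false then ['.', '.'] else ['.']))) := by
        funext em q
        by_cases h1 : q.2 = '#'
        · simp [h1, PySem.List.pySetD_natCast, PySem.List.pyGetD_natCast]
        · by_cases h2 : PySem.List.pyGetD bc q.1 false <;>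
            simp [h1, h2, PySem.List.pySetD_natCast, PySem.List.pyGetD_natCast]
      rw [hfun, pv_inner_em]
      have hget : (pre ++ ([] : List Char) :: List.replicate rs.length ([] : List Char)).getD pre.length [] = ([] : List Char) := by
        rw [List.getD_eq_getElem _ [] (by simp)]
        simp
      rw [hget, List.set_append_right _ _ (le_refl _)]
      simp
    rw [hstep]
    have := ih (pre ++ [(PySem.List.enumerate r 0).flatMap
          (fun q => if q.2 = '#' then ['#']
                    else if PySem.List.pyGetD bc q.1 false then ['.', '.'] else ['.'])])
    simpa [List.append_assoc] using this


def pvBlank (r : List Char) : Bool := if '#' ∈ r then false else true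

def pvPiece (bc : List Bool) (q : Int × Char) : List Char :=
  if q.2 = '#' then ['#'] else if PySem.List.pyGetD bc q.1 false then ['.', '.'] else ['.']

def pvExpRow (bc : List Bool) (row : List Char) : List Char :=
  (PySem.List.enumerate row 0).flatMap (pvPiece bc)

def pvSeg (bc : List Bool) (W : Nat) (r : List Char) : List (List Char) :=
  (if pvBlank r then [List.replicate W '.'] else []) ++ [pvExpRow bc r]

theorem pv_getD_zero_headD {α : Type} (l : List α) (d : α) : l.getD 0 d = l.headD d := by
  cases l <;> rfl

theorem pv_pass3 (bc : List Bool) (rs : List (List Char)) (P : List (List Char))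
    (s buffer W : Nat) (hP : P.length = s + buffer)
    (hW : ((P ++ rs.map (pvExpRow bc)).headD []).length = W) :
    (PySem.List.enumerate (rs.map pvBlank) (s : Int)).foldl
      (fun (st : List (List Char) × Int) p =>
        if p.2 then
          (PySem.List.insert st.1 (st.2 + p.1)
            (List.replicate (PySem.List.pyGetD st.1 0 []).length '.'), st.2 + 1)
        else st)
      (P ++ rs.map (pvExpRow bc), (buffer : Int))
    = (P ++ rs.flatMap (pvSeg bc W), ((buffer + rs.countP pvBlank : Nat) : Int)) := by
  induction rs generalizing P s buffer with
  | nil => simp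
  | cons r rs ih =>
    simp only [List.map_cons, PySem.List.enumerate_cons, List.foldl_cons]
    have hget : PySem.List.pyGetD (P ++ pvExpRow bc r :: List.map (pvExpRow bc) rs) 0 ([] : List Char)
        = (P ++ pvExpRow bc r :: List.map (pvExpRow bc) rs).headD [] := by
      rw [PySem.List.pyGetD_zero, pv_getD_zero_headD]
    by_cases hb : pvBlank r = true
    · rw [if_pos hb]
      have hpos : ((buffer : Int) + (s : Int)) = ((P.length : Nat) : Int) := by
        rw [hP]; push_cast; ring
      rw [hpos, PySem.List.insert_natCast _ _ _ (by simp)]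
      rw [List.take_left, List.drop_left]
      rw [hget]
      have hWr : ((P ++ pvExpRow bc r :: List.map (pvExpRow bc) rs).headD []).length = W := by
        simpa using hW
      rw [hWr]
      have hins : P ++ List.replicate W '.' :: (pvExpRow bc r :: List.map (pvExpRow bc) rs)
          = (P ++ [List.replicate W '.', pvExpRow bc r]) ++ List.map (pvExpRow bc) rs := by
        simp [List.append_assoc]
      rw [hins]
      have hcast : ((s : Int) + 1) = (((s + 1 : Nat)) : Int) := by push_cast; ring
      have hbuf : ((buffer : Int) + 1) = (((buffer + 1 : Nat)) : Int) := by push_cast; ring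
      rw [hcast, hbuf]
      have hW' : (((P ++ [List.replicate W '.', pvExpRow bc r]) ++ List.map (pvExpRow bc) rs).headD []).length = W := by
        cases P with
        | nil => simp
        | cons p ps => simpa using hW
      have := ih (P ++ [List.replicate W '.', pvExpRow bc r]) (s + 1) (buffer + 1)
        (by simp [hP]; omega) hW'
      rw [this]
      have hcount : (buffer + 1) + rs.countP pvBlank = buffer + (r :: rs).countP pvBlank := by
        rw [List.countP_cons_of_pos hb]; omega
      rw [hcount]
      simp [pvSeg, hb, List.append_assoc]
    · rw [if_neg hb]
      have hins : P ++ pvExpRow bc r :: List.map (pvExpRow bc) rs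
          = (P ++ [pvExpRow bc r]) ++ List.map (pvExpRow bc) rs := by
        simp [List.append_assoc]
      rw [hins]
      have hcast : ((s : Int) + 1) = (((s + 1 : Nat)) : Int) := by push_cast; ring
      rw [hcast]
      have hW' : (((P ++ [pvExpRow bc r]) ++ List.map (pvExpRow bc) rs).headD []).length = W := by
        cases P with
        | nil => simpa using hW
        | cons p ps => simpa using hW
      have := ih (P ++ [pvExpRow bc r]) (s + 1) buffer (by simp [hP]; omega) hW'
      rw [this]
      have hcount : buffer + rs.countP pvBlank = buffer + (r :: rs).countP pvBlank := by
        rw [List.countP_cons_of_neg (by simpa using hb)]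
      rw [hcount]
      simp [pvSeg, hb, List.append_assoc]

theorem pv_passB (bc : List Bool) (rs : List (List Char)) (out : List (List Char)) (W : Nat) :
    rs.foldl
      (fun (st : List (List Char) × Int) row =>
        let expanded := (PySem.List.enumerate row 0).flatMap
          (fun q => if q.2 = '#' then ['#']
                    else if PySem.List.pyGetD bc q.1 false then ['.', '.'] else ['.'])
        let width := if st.2 < 0 then (expanded.length : Int) else st.2
        let out := if PySem.Chars.isIn ['#'] row = false then st.1 ++ [List.replicate width.toNat '.'] else st.1
        (out ++ [expanded], width))
      (out, (W : Int))
    = (out ++ rs.flatMap (pvSeg bc W), (W : Int)) := by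
  induction rs generalizing out with
  | nil => simp
  | cons r rs ih =>
    simp only [List.foldl_cons]
    have hnn : ¬ ((W : Int) < 0) := by omega
    have hexp : (PySem.List.enumerate r 0).flatMap
          (fun q => if q.2 = '#' then ['#']
                    else if PySem.List.pyGetD bc q.1 false then ['.', '.'] else ['.'])
        = pvExpRow bc r := rfl
    simp only [hexp, if_neg hnn, Int.toNat_natCast]
    by_cases hm : '#' ∈ r
    · have hin : PySem.Chars.isIn ['#'] r = true := by
        rw [PySem.Chars.isIn_iff_infix, List.singleton_infix_iff]; exact hm
      rw [if_neg (by simp [hin])]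
      rw [ih (out ++ [pvExpRow bc r])]
      simp [pvSeg, pvBlank, hm, List.append_assoc]
    · have hin : PySem.Chars.isIn ['#'] r = false := by
        rw [PySem.Chars.isIn_eq_false_iff, List.singleton_infix_iff]; exact hm
      rw [if_pos (by simp [hin])]
      rw [ih (out ++ [List.replicate W '.'] ++ [pvExpRow bc r])]
      simp [pvSeg, pvBlank, hm, List.append_assoc]

theorem pvBlank_eq : (fun (r : List Char) => if '#' ∈ r then false else true) = pvBlank := rfl

theorem pvExpRow_eq (bc : List Bool) :
    (fun (row : List Char) => (PySem.List.enumerate row 0).flatMap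
      (fun q => if q.2 = '#' then ['#']
                else if PySem.List.pyGetD bc q.1 false then ['.', '.'] else ['.']))
    = pvExpRow bc := rfl

theorem pv_passB_top (bc : List Bool) (r : List Char) (rs : List (List Char)) :
    (r :: rs).foldl
      (fun (st : List (List Char) × Int) row =>
        let expanded := (PySem.List.enumerate row 0).flatMap
          (fun q => if q.2 = '#' then ['#']
                    else if PySem.List.pyGetD bc q.1 false then ['.', '.'] else ['.'])
        let width := if st.2 < 0 then (expanded.length : Int) else st.2
        let out := if PySem.Chars.isIn ['#'] row = false then st.1 ++ [List.replicate width.toNat '.'] else st.1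
        (out ++ [expanded], width))
      ([], -1)
    = ((r :: rs).flatMap (pvSeg bc (pvExpRow bc r).length), ((pvExpRow bc r).length : Int)) := by
  simp only [List.foldl_cons]
  have hneg : ((-1 : Int) < 0) := by norm_num
  have hexp : (PySem.List.enumerate r 0).flatMap
        (fun q => if q.2 = '#' then ['#']
                  else if PySem.List.pyGetD bc q.1 false then ['.', '.'] else ['.'])
      = pvExpRow bc r := rfl
  simp only [hexp, if_pos hneg, Int.toNat_natCast]
  by_cases hm : '#' ∈ r
  · have hin : PySem.Chars.isIn ['#'] r = true := by
      rw [PySem.Chars.isIn_iff_infix, List.singleton_infix_iff]; exact hm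
    rw [if_neg (by simp [hin])]
    rw [pv_passB bc rs ([] ++ [pvExpRow bc r]) (pvExpRow bc r).length]
    simp [pvSeg, pvBlank, hm]
  · have hin : PySem.Chars.isIn ['#'] r = false := by
      rw [PySem.Chars.isIn_eq_false_iff, List.singleton_infix_iff]; exact hm
    rw [if_pos (by simp [hin])]
    rw [pv_passB bc rs ([] ++ [List.replicate (pvExpRow bc r).length '.'] ++ [pvExpRow bc r])
      (pvExpRow bc r).length]
    simp [pvSeg, pvBlank, hm]

theorem pv_ports_eq (input_data : List String) :
    expand_blanks input_data = expand_blanks_alt input_data := by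
  cases input_data with
  | nil => rfl
  | cons s0 t =>
    unfold expand_blanks expand_blanks_alt
    simp only [List.map_cons]
    set rows := s0.toList :: List.map String.toList t with hrows
    simp only [pv_pass1_prod]
    rw [pv_bc_enum_drop]
    set bc := rows.foldl
      (fun (bc : List Bool) row =>
        (PySem.List.enumerate row 0).foldl
          (fun (bc : List Bool) q => if q.2 = '#' then PySem.List.pySetD bc q.1 false else bc) bc)
      (List.replicate (PySem.List.pyGetD rows 0 []).length true) with hbc
    have hbr := pv_pass_br rows []
    simp only [List.length_nil, Nat.cast_zero, List.nil_append] at hbr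
    rw [hbr]
    have hem := pv_pass2 bc rows []
    simp only [List.length_nil, Nat.cast_zero, List.nil_append] at hem
    rw [hem]
    rw [pvBlank_eq, pvExpRow_eq]
    have h3 := pv_pass3 bc rows [] 0 0 (pvExpRow bc s0.toList).length (by simp)
      (by rw [hrows]; simp)
    simp only [Nat.cast_zero, List.nil_append, Nat.zero_add] at h3
    rw [h3]
    rw [hrows]
    show List.map (fun cs => String.ofList cs)
        (List.flatMap (pvSeg bc (pvExpRow bc s0.toList).length) (s0.toList :: List.map String.toList t))
      = _
    exact congrArg (fun (p : List (List Char) × Int) => List.map (fun cs => String.ofList cs) p.1)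
      (pv_passB_top bc s0.toList (List.map String.toList t)).symm

-- ===== VERDICT (by name: the statement is the Claim_ definition above) =====
theorem expand_blanks_spec : Claim_equal_expand_blanks := by
  intro input_data _ _
  unfold Spec_expand_blanks
  exact pv_ports_eq input_data
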